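-- pv_equiv track=rewrite | github.com/bhuvesh9/Security | Cryptography/Crypto.py | hybrid_decryption
-- ===== SOURCE A (Python) =====
-- def hybrid_decryption(cipher, keyword):
--     cipher = list(cipher)
--     ciphertext_list = list()
--     for i in range(0,len(cipher),2):
--         ciphertext_list.append(cipher[i]+cipher[i+1])
--     key = vigenere_generate_key(keyword, len(cipher))
--
--     # Step 1 - Polybius Decryption
--     d_polybius, index= polybius_decryption(ciphertext_list)
--
--     # Step 2 - Vigenere Decryption
--     d_vigenere = vigenere_decryption(d_polybius, key)
--     return d_vigenere
--
-- def vigenere_generate_key(key, length):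
--     key = list(key)
--     for i in range(length):
--         key.append(key[i % len(key)])
--     return("".join(key))
--
-- def vigenere_decryption(cipher_text, key):
--     plain_text = list()
--     for i in range(len(cipher_text)):
--         x = chr((((ord(cipher_text[i]) - ord('A')) - ord(key[i]) - ord('A'))+ 26 ) % 26 + ord('A'))
--         plain_text.append(x)
--     return("".join(plain_text))
--
-- def polybius_decryption(cipher):
--     plain_table=["A","B","C","D","E","F","G","H","I","J","K","L","M","N","O","P","Q",
--           "R","S","T","U","V","W","X","Y","Z"," "]
--     cipher_table=["11","12","13","14","15","21","22","23","24","26","25","31","32","33","34",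
--           "35","41","42","43","44","45","51","52","53","54","55"," "]
--     plain_table_index = list()
--     plain_text= list()
--     for i in range(len(cipher)):
--         for j in range(len(cipher_table)):
--             if (cipher[i] == " "):
--                 plain_table_index.append(26)
--                 break
--             if cipher_table[j] == cipher[i]:
--                 plain_table_index.append(j)
--     for k in range(len(plain_table_index)):
--         p = plain_table[plain_table_index[k]]
--         plain_text.append(p)
--     return plain_text,plain_table_index
-- ===== SOURCE B (Python) =====
-- _POLYBIUS = {"11": "A", "12": "B", "13": "C", "14": "D", "15": "E",
--              "21": "F", "22": "G", "23": "H", "24": "I", "26": "J",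
--              "25": "K", "31": "L", "32": "M", "33": "N", "34": "O",
--              "35": "P", "41": "Q", "42": "R", "43": "S", "44": "T",
--              "45": "U", "51": "V", "52": "W", "53": "X", "54": "Y",
--              "55": "Z"}
--
-- def hybrid_decryption(cipher, keyword):
--     out = []
--     counter = 0
--     for i in range(0, len(cipher), 2):
--         letter = _POLYBIUS.get(cipher[i] + cipher[i + 1])
--         if letter is not None:
--             shift = ord(keyword[counter % len(keyword)])
--             out.append(chr((ord(letter) - shift) % 26 + ord('A')))
--             counter += 1
--     return "".join(out)
-- ===== Notes on version B (the rewrite author's own statement) =====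
-- stated objective: faster
-- what changed: Replaces A's three-pass pipeline (build token list, expand the Vigenere key to len(keyword)+len(cipher) by repeated appends, scan the 27-entry Polybius table for every token, then a second indexed Vigenere pass) with one fused loop over character pairs using a precomputed code->letter dict and a running key counter that indexes keyword directly.
import Mathlib
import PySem

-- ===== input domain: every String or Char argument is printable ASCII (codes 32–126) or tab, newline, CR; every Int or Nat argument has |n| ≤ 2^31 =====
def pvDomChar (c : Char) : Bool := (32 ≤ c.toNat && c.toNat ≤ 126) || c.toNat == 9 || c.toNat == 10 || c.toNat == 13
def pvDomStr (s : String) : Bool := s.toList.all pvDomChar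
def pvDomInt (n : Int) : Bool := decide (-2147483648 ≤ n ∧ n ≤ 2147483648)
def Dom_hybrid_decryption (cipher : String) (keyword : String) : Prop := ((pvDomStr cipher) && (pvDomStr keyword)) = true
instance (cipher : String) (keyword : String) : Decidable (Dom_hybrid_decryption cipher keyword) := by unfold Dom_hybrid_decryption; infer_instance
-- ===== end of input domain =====

-- B replaces A's three-pass pipeline (token list, expanded Vigenere key, per-token Polybius
-- table scan, then a second Vigenere pass) by a single fused loop over character pairs with a
-- lookup dict and a running key counter; objective: faster (constant factor, measured).

-- ===== PORT A =====
-- tables of polybius_decryption ("plain_table" as chars: its entries are 1-char strings)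
def pvPlainTable : List Char :=
  ['A','B','C','D','E','F','G','H','I','J','K','L','M','N','O','P','Q',
   'R','S','T','U','V','W','X','Y','Z',' ']
def pvCipherTable : List String :=
  ["11","12","13","14","15","21","22","23","24","26","25","31","32","33","34",
   "35","41","42","43","44","45","51","52","53","54","55"," "]

-- the inner 'for j' loop of polybius_decryption (j carried explicitly; [26]+break on space)
def pvPolyInner (ci : String) (j : Int) : List String → List Int
  | [] => []
  | t :: rest =>
    if ci = " " then [26]
    else (if t = ci then [j] else []) ++ pvPolyInner ci (j + 1) rest

-- polybius_decryption: first loop collects indices, second maps them through plain_table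
def pvPolybius (cipher : List String) : List Char × List Int :=
  let idxs := cipher.foldl (fun acc ci => acc ++ pvPolyInner ci 0 pvCipherTable) []
  let pt := idxs.foldl (fun acc j => acc ++ [(PySem.List.pyGet? pvPlainTable j).getD ' ']) []
  (pt, idxs)

-- vigenere_generate_key: key.append(key[i % len(key)]) for i in range(length)
def pvVigKey (keyword : String) (length : Int) : List Char :=
  (PySem.List.pyRange 0 length 1).foldl
    (fun acc i => acc ++ [(PySem.List.pyGet? acc (PySem.Int.mod i (acc.length : Int))).getD ' ']) keyword.toList

-- vigenere_decryption
def pvVigDec (ct : List Char) (key : List Char) : List Char :=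
  (PySem.List.pyRange 0 (ct.length : Int) 1).foldl
    (fun acc i =>
      let c := (PySem.List.pyGet? ct i).getD ' '
      let k := (PySem.List.pyGet? key i).getD ' '
      acc ++ [Char.ofNat (PySem.Int.mod (((c.toNat : Int) - 65) - (k.toNat : Int) - 65 + 26) 26 + 65).toNat])
    []

-- the pairing loop of hybrid_decryption
def pvTokens (cs : List Char) : List String :=
  (PySem.List.pyRange 0 (cs.length : Int) 2).foldl
    (fun acc i =>
      acc ++ [String.ofList [(PySem.List.pyGet? cs i).getD ' ', (PySem.List.pyGet? cs (i + 1)).getD ' ']])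
    []

def hybrid_decryption (cipher : String) (keyword : String) : String :=
  let cs := cipher.toList
  let ciphertext_list := pvTokens cs
  let key := pvVigKey keyword (cs.length : Int)
  let dp := pvPolybius ciphertext_list
  String.ofList (pvVigDec dp.1 key)

-- ===== PORT B =====
def pvPolyDict : PySem.Dict String Char :=
  PySem.Dict.ofList
    [("11",'A'),("12",'B'),("13",'C'),("14",'D'),("15",'E'),
     ("21",'F'),("22",'G'),("23",'H'),("24",'I'),("26",'J'),
     ("25",'K'),("31",'L'),("32",'M'),("33",'N'),("34",'O'),
     ("35",'P'),("41",'Q'),("42",'R'),("43",'S'),("44",'T'),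
     ("45",'U'),("51",'V'),("52",'W'),("53",'X'),("54",'Y'),
     ("55",'Z')]

def hybrid_decryption_alt (cipher : String) (keyword : String) : String :=
  let cs := cipher.toList
  let ks := keyword.toList
  let st := (PySem.List.pyRange 0 (cs.length : Int) 2).foldl
    (fun (st : List Char × Int) i =>
      let tok := String.ofList [(PySem.List.pyGet? cs i).getD ' ', (PySem.List.pyGet? cs (i + 1)).getD ' ']
      match PySem.Dict.get? pvPolyDict tok with
      | none => st
      | some letter =>
        let shift := ((PySem.List.pyGet? ks (PySem.Int.mod st.2 (ks.length : Int))).getD ' ').toNat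
        (st.1 ++ [Char.ofNat (PySem.Int.mod ((letter.toNat : Int) - (shift : Int)) 26 + 65).toNat], st.2 + 1))
    ([], 0)
  String.ofList st.1

-- ===== PRECONDITION & SPEC =====
-- Pre_ excludes exactly the inputs where A raises: odd-length cipher (IndexError on cipher[i+1])
-- and empty keyword with nonempty cipher (ZeroDivisionError in vigenere_generate_key).
def Pre_hybrid_decryption (cipher : String) (keyword : String) : Prop :=
  cipher.toList.length % 2 = 0 ∧ (keyword ≠ "" ∨ cipher = "")
instance (cipher : String) (keyword : String) : Decidable (Pre_hybrid_decryption cipher keyword) := by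
  unfold Pre_hybrid_decryption; infer_instance

def pvWitness_hybrid_decryption : String × String := ("1123", "KEY")

def Spec_hybrid_decryption (cipher : String) (keyword : String) (out : String) : Prop := out = hybrid_decryption_alt cipher keyword
instance (cipher : String) (keyword : String) (out : String) : Decidable (Spec_hybrid_decryption cipher keyword out) := by unfold Spec_hybrid_decryption; infer_instance

-- ===== CLAIM (what is proved, stated in full; the proofs are below) =====
def Claim_equal_hybrid_decryption : Prop := ∀ (cipher : String) (keyword : String), Dom_hybrid_decryption cipher keyword → Pre_hybrid_decryption cipher keyword → Spec_hybrid_decryption cipher keyword (hybrid_decryption cipher keyword)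

-- ===== LEMMAS AND PROOFS =====

-- the token list for an even-length cipher: consecutive character pairs
def pvPairsOf : List Char → List String
  | a :: b :: r => String.ofList [a, b] :: pvPairsOf r
  | _ => []

-- A's per-index letter lookup, its letter stream, and the two shift formulas
def pvLetterOf (j : Int) : Char := (PySem.List.pyGet? pvPlainTable j).getD ' '
def pvLetters (ts : List String) : List Char :=
  ts.flatMap (fun t => (pvPolyInner t 0 pvCipherTable).map pvLetterOf)
def pvShiftA (l p : Char) : Char :=
  Char.ofNat (PySem.Int.mod (((l.toNat : Int) - 65) - (p.toNat : Int) - 65 + 26) 26 + 65).toNat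
def pvShiftB (l p : Char) : Char :=
  Char.ofNat (PySem.Int.mod ((l.toNat : Int) - ((p.toNat : Nat) : Int)) 26 + 65).toNat

-- A's decryption stream (letters shifted by key position) and B's fused token stream
def pvSpineL (pk : Nat → Char) : List Char → Nat → List Char
  | [], _ => []
  | l :: r, i => pvShiftA l (pk i) :: pvSpineL pk r (i + 1)
def pvSpineB (ks : List Char) : List String → Int → List Char
  | [], _ => []
  | t :: r, c =>
    match PySem.Dict.get? pvPolyDict t with
    | none => pvSpineB ks r c
    | some l =>
      pvShiftB l ((PySem.List.pyGet? ks (PySem.Int.mod c (ks.length : Int))).getD ' ') :: pvSpineB ks r (c + 1)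

-- the dict entries, used to compare A's table scan with B's dict lookup
def pvDictPairs : List (String × Char) :=
  [("11",'A'),("12",'B'),("13",'C'),("14",'D'),("15",'E'),
   ("21",'F'),("22",'G'),("23",'H'),("24",'I'),("26",'J'),
   ("25",'K'),("31",'L'),("32",'M'),("33",'N'),("34",'O'),
   ("35",'P'),("41",'Q'),("42",'R'),("43",'S'),("44",'T'),
   ("45",'U'),("51",'V'),("52",'W'),("53",'X'),("54",'Y'),
   ("55",'Z')]

theorem pyget_cons2 (a b : Char) (r : List Char) (k : Nat) :
    PySem.List.pyGet? (a :: b :: r) ((k : Int) + 2) = PySem.List.pyGet? r k := by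
  have h1 : ((k : Int) + 2) = (((k + 2 : Nat)) : Int) := by push_cast; ring
  rw [h1, PySem.List.pyGet?_natCast, PySem.List.pyGet?_natCast]
  simp

theorem pyrange_two (n : Nat) :
    PySem.List.pyRange 0 (n : Int) 2
    = (List.range ((n + 1) / 2)).map (fun k : Nat => (0 : Int) + 2 * ↑k) := by
  rw [PySem.List.pyRange_of_pos _ _ (by norm_num)]
  congr 1
  split_ifs with h
  · congr 1; omega
  · have : n = 0 := by omega
    simp [this]

theorem foldl_pyRange_two {β : Type} (f : β → String → β) :
    ∀ (cs : List Char), cs.length % 2 = 0 → ∀ (init : β),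
    (PySem.List.pyRange 0 (cs.length : Int) 2).foldl
      (fun acc i => f acc (String.ofList [(PySem.List.pyGet? cs i).getD ' ', (PySem.List.pyGet? cs (i + 1)).getD ' '])) init
    = (pvPairsOf cs).foldl f init := by
  intro cs
  induction cs using pvPairsOf.induct with
  | case1 a b r ih =>
    intro hev init
    have hev' : r.length % 2 = 0 := by simp at hev; omega
    rw [pyrange_two]
    rw [show ((a :: b :: r).length + 1) / 2 = r.length / 2 + 1 by simp; omega]
    rw [List.foldl_map, List.range_succ_eq_map, List.foldl_cons, List.foldl_map]
    have e0 : ∀ j : Nat, ((0:Int) + 2 * ((j:Nat):Int)) = ((2*j : Nat) : Int) := by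
      intro j; push_cast; ring
    have hhead : (String.ofList [(PySem.List.pyGet? (a :: b :: r) ((0:Int) + 2 * ((0:Nat):Int))).getD ' ',
        (PySem.List.pyGet? (a :: b :: r) ((0:Int) + 2 * ((0:Nat):Int) + 1)).getD ' ']) = String.ofList [a, b] := by
      rw [e0 0, show ((2*0:Nat):Int) + 1 = ((1:Nat):Int) by norm_num]
      rw [PySem.List.pyGet?_natCast, PySem.List.pyGet?_natCast]
      simp
    rw [hhead]
    have hbody : ∀ (acc : β), ∀ k ∈ List.range (r.length / 2),
        f acc (String.ofList [(PySem.List.pyGet? (a :: b :: r) ((0:Int) + 2 * (↑(Nat.succ k)))).getD ' ',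
          (PySem.List.pyGet? (a :: b :: r) ((0:Int) + 2 * (↑(Nat.succ k)) + 1)).getD ' '])
        = f acc (String.ofList [(PySem.List.pyGet? r ((0:Int) + 2 * (↑k))).getD ' ',
          (PySem.List.pyGet? r ((0:Int) + 2 * (↑k) + 1)).getD ' ']) := by
      intro acc k _
      have i1 : PySem.List.pyGet? (a :: b :: r) ((0:Int) + 2 * ((Nat.succ k : Nat):Int))
          = PySem.List.pyGet? r ((0:Int) + 2 * (↑k)) := by
        rw [show ((0:Int) + 2 * ((Nat.succ k : Nat):Int)) = ((2*k : Nat):Int) + 2 by push_cast; ring,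
          pyget_cons2, e0]
      have i2 : PySem.List.pyGet? (a :: b :: r) ((0:Int) + 2 * ((Nat.succ k : Nat):Int) + 1)
          = PySem.List.pyGet? r ((0:Int) + 2 * (↑k) + 1) := by
        rw [show ((0:Int) + 2 * ((Nat.succ k : Nat):Int) + 1) = ((2*k+1 : Nat):Int) + 2 by push_cast; ring,
          pyget_cons2]
        push_cast; ring_nf
      rw [i1, i2]
    rw [PySem.List.foldl_congr_mem _ _ _ _ hbody]
    have hr := ih hev' (f init (String.ofList [a, b]))
    rw [pyrange_two, show (r.length + 1) / 2 = r.length / 2 by omega, List.foldl_map] at hr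
    rw [hr]
    rfl
  | case2 cs h =>
    intro hev init
    cases cs with
    | nil => simp [pvPairsOf, PySem.List.pyRange]
    | cons x xs => cases xs with
      | nil => simp at hev
      | cons y ys => exact absurd rfl (h x y ys)

theorem pairs_shape (cs : List Char) : ∀ t ∈ pvPairsOf cs, ∃ a b, t = String.ofList [a, b] := by
  induction cs using pvPairsOf.induct with
  | case1 a b r ih =>
    intro t ht
    rcases (by simpa [pvPairsOf] using ht : t = String.ofList [a,b] ∨ t ∈ pvPairsOf r) with h | h
    · exact ⟨a, b, h⟩
    · exact ih t h
  | case2 cs h => intro t ht; cases cs with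
    | nil => simp [pvPairsOf] at ht
    | cons x xs => cases xs with
      | nil => simp [pvPairsOf] at ht
      | cons y ys => exact absurd rfl (h x y ys)

theorem pairs_len (cs : List Char) : (pvPairsOf cs).length ≤ cs.length := by
  induction cs using pvPairsOf.induct with
  | case1 a b r ih => simp [pvPairsOf]; omega
  | case2 cs h => cases cs with
    | nil => simp [pvPairsOf]
    | cons x xs => cases xs with
      | nil => simp [pvPairsOf]
      | cons y ys => exact absurd rfl (h x y ys)

theorem inner_nomatch (ci : String) (hci : ci ≠ " ") :
    ∀ (ts : List String) (j : Int), ci ∉ ts → pvPolyInner ci j ts = [] := by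
  intro ts
  induction ts with
  | nil => intro j _; rfl
  | cons t rest ih =>
    intro j hmem
    simp only [List.mem_cons, not_or] at hmem
    simp only [pvPolyInner, if_neg hci, if_neg (fun h : t = ci => hmem.1 h.symm), List.nil_append]
    exact ih (j + 1) hmem.2

theorem scan_eq_dict (ci : String) (hci : ci ≠ " ") :
    ∀ (ps : List (String × Char)) (j : Int),
    (ps.map Prod.fst).Nodup →
    (∀ (i : Nat), (h : i < ps.length) → pvLetterOf (j + (i : Int)) = (ps[i]'h).2) →
    (pvPolyInner ci j (ps.map Prod.fst ++ [" "])).map pvLetterOf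
    = ((PySem.Dict.mk ps).get? ci).toList := by
  intro ps
  induction ps with
  | nil =>
    intro j _ _
    simp only [List.map_nil, List.nil_append]
    simp only [pvPolyInner, if_neg hci, if_neg (fun h : " " = ci => hci h.symm), List.nil_append]
    rfl
  | cons p rest ih =>
    intro j hnd hlet
    simp only [List.map_cons, List.cons_append, pvPolyInner, if_neg hci]
    rw [PySem.Dict.get?_mk_cons]
    by_cases hm : p.1 = ci
    · rw [if_pos hm, if_pos (by exact beq_iff_eq.mpr hm)]
      have hnotin : ci ∉ rest.map Prod.fst := by
        simp only [List.map_cons, List.nodup_cons] at hnd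
        rw [← hm]; exact hnd.1
      rw [inner_nomatch ci hci _ (j+1) (by
        intro hmem
        rcases List.mem_append.mp hmem with h | h
        · exact hnotin h
        · simp at h; exact hci h)]
      have := hlet 0 (by simp)
      simp only [Nat.cast_zero, add_zero] at this
      simp [this]
    · rw [if_neg hm, if_neg (by simp [hm]), List.nil_append]
      apply ih (j + 1)
      · simp only [List.map_cons, List.nodup_cons] at hnd; exact hnd.2
      · intro i h
        have := hlet (i + 1) (by simpa using Nat.succ_lt_succ h)
        rw [show (j + 1 + (i : Int)) = j + ((i + 1 : Nat) : Int) by push_cast; ring]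
        simpa using this



set_option maxHeartbeats 1000000 in
theorem token_lookup (a b : Char) :
    (pvPolyInner (String.ofList [a, b]) 0 pvCipherTable).map pvLetterOf
    = (PySem.Dict.get? pvPolyDict (String.ofList [a, b])).toList := by
  have hsp : String.ofList [a, b] ≠ " " := by
    intro h
    have := congrArg String.toList h
    simp at this
  have htab : pvCipherTable = pvDictPairs.map Prod.fst ++ [" "] := by decide
  have hdict : pvPolyDict = PySem.Dict.mk pvDictPairs := by decide
  rw [htab, hdict]
  exact scan_eq_dict _ hsp pvDictPairs 0 (by decide) (by decide)

theorem polybius_fst (ts : List String) : (pvPolybius ts).1 = pvLetters ts := by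
  show (ts.foldl (fun acc ci => acc ++ pvPolyInner ci 0 pvCipherTable) []).foldl
      (fun acc j => acc ++ [(PySem.List.pyGet? pvPlainTable j).getD ' ']) [] = pvLetters ts
  rw [PySem.List.foldl_append_eq_flatMap (fun ci => pvPolyInner ci 0 pvCipherTable) ts []]
  rw [PySem.List.foldl_append_eq_flatMap (fun j => [(PySem.List.pyGet? pvPlainTable j).getD ' ']) _ []]
  have hsing : ∀ l : List Int, (l.map (fun j => [(PySem.List.pyGet? pvPlainTable j).getD ' '])).flatten = l.map pvLetterOf := by
    intro l; induction l with
    | nil => simp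
    | cons x xs ih => simp [ih, pvLetterOf]
  simp only [pvLetters, List.flatMap_def]
  induction ts with
  | nil => simp
  | cons t r ih =>
    simp only [List.map_cons, List.flatten_cons, List.map_append, List.flatten_append, hsing,
      List.nil_append] at ih ⊢
    rw [ih]


theorem vigkey_eq (keyword : String) (hk : keyword.toList ≠ []) (n : Nat) :
    pvVigKey keyword (n : Int)
    = (List.range (keyword.toList.length + n)).map
        (fun j => keyword.toList.getD (j % keyword.toList.length) ' ') := by
  set K := keyword.toList with hK
  have hκ : 0 < K.length := List.length_pos_iff.mpr hk
  unfold pvVigKey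
  induction n with
  | zero =>
    rw [show ((0:Nat):Int) = 0 by norm_num, PySem.List.pyRange_one_eq_nil le_rfl]
    simp only [List.foldl_nil, Nat.add_zero]
    apply List.ext_getElem (by simp [hK])
    intro i h1 h2
    simp only [List.getElem_map, List.getElem_range]
    rw [Nat.mod_eq_of_lt (by simpa using h2), List.getD_eq_getElem _ _ (by simpa using h2)]
  | succ m ih =>
    rw [show (((m+1:Nat)):Int) = (m:Int) + 1 by push_cast; ring,
      PySem.List.pyRange_one_succ_right (by positivity), List.foldl_append, List.foldl_cons, List.foldl_nil, ih]
    set prev := (List.range (K.length + m)).map (fun j => K.getD (j % K.length) ' ') with hprev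
    have hlen : prev.length = K.length + m := by simp [hprev]
    have hmod : PySem.Int.mod (m:Int) ((prev.length : Nat) : Int) = ((m % (K.length + m) : Nat) : Int) := by
      rw [hlen]; exact PySem.Int.mod_natCast m (K.length + m)
    rw [hmod, Nat.mod_eq_of_lt (by omega), PySem.List.pyGet?_natCast]
    have hget : prev[m]? = some (K.getD (m % K.length) ' ') := by
      rw [hprev]
      rw [List.getElem?_map]
      simp [List.getElem?_range (show m < K.length + m by omega)]
    rw [hget]
    simp only [Option.getD_some]
    rw [show K.length + (m+1) = (K.length + m) + 1 by ring, List.range_succ, List.map_append]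
    simp [Nat.add_mod_left, hprev, List.getD_eq_getElem?_getD]

theorem shiftA_eq_shiftB (l p : Char) : pvShiftA l p = pvShiftB l p := by
  unfold pvShiftA pvShiftB
  rw [PySem.Int.mod_eq_emod_of_pos (by norm_num), PySem.Int.mod_eq_emod_of_pos (by norm_num)]
  congr 2
  omega

theorem letters_len (ts : List String) (h : ∀ t ∈ ts, ∃ a b, t = String.ofList [a, b]) :
    (pvLetters ts).length ≤ ts.length := by
  induction ts with
  | nil => simp [pvLetters]
  | cons t r ih =>
    obtain ⟨a, b, rfl⟩ := h _ (List.mem_cons_self)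
    have hlen : ((pvPolyInner (String.ofList [a, b]) 0 pvCipherTable).map pvLetterOf).length ≤ 1 := by
      rw [token_lookup]
      cases PySem.Dict.get? pvPolyDict (String.ofList [a, b]) <;> simp
    have := ih (fun t ht => h t (List.mem_cons_of_mem _ ht))
    simp only [pvLetters, List.flatMap_cons, List.length_append, List.length_cons] at *
    omega

theorem map_range_spine (pk : Nat → Char) :
    ∀ (ct : List Char) (s : Nat),
    (List.range ct.length).map (fun k => pvShiftA (ct.getD k ' ') (pk (s + k))) = pvSpineL pk ct s := by
  intro ct
  induction ct with
  | nil => intro s; simp [pvSpineL]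
  | cons c r ih =>
    intro s
    simp only [List.length_cons, List.range_succ_eq_map, List.map_cons, List.map_map, pvSpineL,
      List.getD_cons_zero, Nat.add_zero]
    rw [show ((fun k => pvShiftA ((c :: r).getD k ' ') (pk (s + k))) ∘ Nat.succ)
        = (fun k => pvShiftA (r.getD k ' ') (pk ((s + 1) + k))) from funext fun k => by
      simp only [Function.comp, List.getD_cons_succ]
      rw [show s + Nat.succ k = (s + 1) + k by omega]]
    rw [ih (s + 1)]


theorem foldl_append_singleton {α β : Type} (g : α → β) (l : List α) (init : List β) :
    l.foldl (fun acc x => acc ++ [g x]) init = init ++ l.map g := by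
  induction l generalizing init with
  | nil => simp
  | cons x xs ih => simp [ih]

theorem vigdec_eq (ct key : List Char) (pk : Nat → Char)
    (h : ∀ i, i < ct.length → key[i]? = some (pk i)) :
    pvVigDec ct key = pvSpineL pk ct 0 := by
  unfold pvVigDec
  show (PySem.List.pyRange 0 (ct.length : Int) 1).foldl
      (fun acc i => acc ++ [Char.ofNat (PySem.Int.mod
        (((((PySem.List.pyGet? ct i).getD ' ').toNat : Int) - 65)
          - (((PySem.List.pyGet? key i).getD ' ').toNat : Int) - 65 + 26) 26 + 65).toNat]) []
    = pvSpineL pk ct 0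
  rw [foldl_append_singleton, List.nil_append, PySem.List.pyRange_one, List.map_map]
  rw [show (((ct.length : Int)) - 0).toNat = ct.length by omega]
  rw [← map_range_spine pk ct 0]
  apply List.map_congr_left
  intro k hk
  rw [List.mem_range] at hk
  simp only [Function.comp, zero_add]
  rw [PySem.List.pyGet?_natCast, PySem.List.pyGet?_natCast, h k hk]
  simp only [Option.getD_some]
  rw [← List.getD_eq_getElem?_getD]
  rfl


theorem spine_bridge (ks : List Char) :
    ∀ (ts : List String), (∀ t ∈ ts, ∃ a b, t = String.ofList [a, b]) → ∀ (i : Nat),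
    pvSpineL (fun j => ks.getD (j % ks.length) ' ') (pvLetters ts) i = pvSpineB ks ts (i : Int) := by
  intro ts
  induction ts with
  | nil => intro _ i; simp [pvLetters, pvSpineL, pvSpineB]
  | cons t r ih =>
    intro hsh i
    obtain ⟨a, b, rfl⟩ := hsh _ (List.mem_cons_self)
    have ihr := ih (fun t ht => hsh t (List.mem_cons_of_mem _ ht))
    simp only [pvLetters, List.flatMap_cons] at *
    rw [token_lookup]
    simp only [pvSpineB]
    cases hg : PySem.Dict.get? pvPolyDict (String.ofList [a, b]) with
    | none => simpa using ihr i
    | some l =>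
      simp only [Option.toList_some, List.cons_append, pvSpineL]
      congr 1
      · rw [shiftA_eq_shiftB]
        congr 1
        rw [PySem.Int.mod_natCast, PySem.List.pyGet?_natCast, ← List.getD_eq_getElem?_getD]
      · rw [show ((i : Int) + 1) = (((i + 1 : Nat)) : Int) by push_cast; ring]
        exact ihr (i + 1)

theorem b_fold (ks : List Char) :
    ∀ (ts : List String) (out : List Char) (c : Int),
    (ts.foldl
      (fun (st : List Char × Int) t =>
        match PySem.Dict.get? pvPolyDict t with
        | none => st
        | some letter =>
          let shift := ((PySem.List.pyGet? ks (PySem.Int.mod st.2 (ks.length : Int))).getD ' ').toNat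
          (st.1 ++ [Char.ofNat (PySem.Int.mod ((letter.toNat : Int) - (shift : Int)) 26 + 65).toNat], st.2 + 1))
      (out, c)).1 = out ++ pvSpineB ks ts c := by
  intro ts
  induction ts with
  | nil => intro out c; simp [pvSpineB]
  | cons t r ih =>
    intro out c
    simp only [List.foldl_cons, pvSpineB]
    cases hg : PySem.Dict.get? pvPolyDict t with
    | none => exact ih out c
    | some l =>
      rw [ih]
      simp [pvShiftB]

theorem hd_spec_main : ∀ (cipher keyword : String),
    Pre_hybrid_decryption cipher keyword →
    hybrid_decryption cipher keyword = hybrid_decryption_alt cipher keyword := by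
  intro cipher keyword hpre
  obtain ⟨hev, hkc⟩ := hpre
  by_cases hc : cipher = ""
  · subst hc; rfl
  · have hK : keyword.toList ≠ [] := by
      rcases hkc with h | h
      · intro hnil
        exact h (String.toList_inj.mp (by simpa using hnil))
      · exact absurd h hc
    have hκ : 0 < keyword.toList.length := List.length_pos_iff.mpr hK
    have htok : pvTokens cipher.toList = pvPairsOf cipher.toList := by
      have h1 := foldl_pyRange_two (fun (acc : List String) t => acc ++ [t]) cipher.toList hev []
      have h2 : (pvPairsOf cipher.toList).foldl (fun acc t => acc ++ [t]) [] = pvPairsOf cipher.toList := by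
        rw [foldl_append_singleton (fun t => t)]
        simp
      exact h1.trans h2
    have hshape := pairs_shape cipher.toList
    have hlen : (pvLetters (pvPairsOf cipher.toList)).length ≤ (pvPairsOf cipher.toList).length :=
      letters_len _ hshape
    have hlen2 : (pvPairsOf cipher.toList).length ≤ cipher.toList.length := pairs_len _
    have hkprop : ∀ i, i < (pvLetters (pvPairsOf cipher.toList)).length →
        (pvVigKey keyword (cipher.toList.length : Int))[i]?
          = some (keyword.toList.getD (i % keyword.toList.length) ' ') := by
      intro i hi
      rw [vigkey_eq keyword hK cipher.toList.length]
      rw [List.getElem?_map, List.getElem?_range (by omega)]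
      rfl
    have hA : pvVigDec (pvPolybius (pvTokens cipher.toList)).1 (pvVigKey keyword (cipher.toList.length : Int))
        = pvSpineL (fun j => keyword.toList.getD (j % keyword.toList.length) ' ')
            (pvLetters (pvPairsOf cipher.toList)) 0 := by
      rw [htok, polybius_fst]
      exact vigdec_eq _ _ _ hkprop
    have hbridge := spine_bridge keyword.toList (pvPairsOf cipher.toList) hshape 0
    have hb2 := foldl_pyRange_two
      (fun (st : List Char × Int) t =>
        match PySem.Dict.get? pvPolyDict t with
        | none => st
        | some letter =>
          let shift := ((PySem.List.pyGet? keyword.toList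
              (PySem.Int.mod st.2 (keyword.toList.length : Int))).getD ' ').toNat
          (st.1 ++ [Char.ofNat (PySem.Int.mod ((letter.toNat : Int) - (shift : Int)) 26 + 65).toNat],
            st.2 + 1))
      cipher.toList hev ([], 0)
    have hbf := b_fold keyword.toList (pvPairsOf cipher.toList) [] 0
    show String.ofList (pvVigDec (pvPolybius (pvTokens cipher.toList)).1
        (pvVigKey keyword (cipher.toList.length : Int)))
      = String.ofList ((PySem.List.pyRange 0 (cipher.toList.length : Int) 2).foldl
          (fun (st : List Char × Int) i =>
            match PySem.Dict.get? pvPolyDict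
                (String.ofList [(PySem.List.pyGet? cipher.toList i).getD ' ',
                  (PySem.List.pyGet? cipher.toList (i + 1)).getD ' ']) with
            | none => st
            | some letter =>
              let shift := ((PySem.List.pyGet? keyword.toList
                  (PySem.Int.mod st.2 (keyword.toList.length : Int))).getD ' ').toNat
              (st.1 ++ [Char.ofNat (PySem.Int.mod ((letter.toNat : Int) - (shift : Int)) 26 + 65).toNat],
                st.2 + 1))
          ([], 0)).1
    rw [hA]
    rw [show ((PySem.List.pyRange 0 (cipher.toList.length : Int) 2).foldl _ (([], 0) : List Char × Int))
        = (pvPairsOf cipher.toList).foldl _ (([], 0) : List Char × Int) from hb2]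
    rw [hbf]
    simp only [List.nil_append]
    exact congrArg String.ofList (by exact_mod_cast hbridge)

-- ===== VERDICT (by name: the statement is the Claim_ definition above) =====
theorem hybrid_decryption_spec : Claim_equal_hybrid_decryption := by
  intro c k _ hpre
  exact hd_spec_main c k hpre
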